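-- pv_equiv track=rewrite | github.com/erasels/Packmaster-Metrics | metrics.py | round_date_keys
-- ===== SOURCE A (Python) =====
-- def round_date_keys(input_dict, level):
--     if level < 0:
--         raise ValueError("Level must be a non-negative integer.")
--
--     merged_dict = {}
--
--     for date_key, data_list in input_dict.items():
--         date_parts = date_key.split('/')
--         rounded_key = '/'.join(date_parts[:level])
--
--         if rounded_key not in merged_dict:
--             merged_dict[rounded_key] = []
--
--         # Merge the lists at the specified level
--         merged_dict[rounded_key].extend(data_list)
--
--     return merged_dict
-- ===== SOURCE B (Python) =====
-- def round_date_keys(input_dict, level):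
--     # Group by rounded key in one mapping pass, then build each bucket by
--     # concatenating the data lists per distinct rounded key (first-seen order).
--     if level < 0:
--         raise ValueError("Level must be a non-negative integer.")
--     pairs = [('/'.join(k.split('/')[:level]), v) for k, v in input_dict.items()]
--     order = list(dict.fromkeys(rk for rk, _ in pairs))
--     return {rk: [x for r, v in pairs if r == rk for x in v] for rk in order}
-- ===== Notes on version B (the rewrite author's own statement) =====
-- stated objective: alternative
-- what changed: Instead of mutating a dict entry per item (setdefault-to-[] then extend), B maps every entry to its rounded key in one pass, dedups the rounded keys in first-seen order, and builds each bucket by concatenating the matching data lists.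
import Mathlib
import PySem

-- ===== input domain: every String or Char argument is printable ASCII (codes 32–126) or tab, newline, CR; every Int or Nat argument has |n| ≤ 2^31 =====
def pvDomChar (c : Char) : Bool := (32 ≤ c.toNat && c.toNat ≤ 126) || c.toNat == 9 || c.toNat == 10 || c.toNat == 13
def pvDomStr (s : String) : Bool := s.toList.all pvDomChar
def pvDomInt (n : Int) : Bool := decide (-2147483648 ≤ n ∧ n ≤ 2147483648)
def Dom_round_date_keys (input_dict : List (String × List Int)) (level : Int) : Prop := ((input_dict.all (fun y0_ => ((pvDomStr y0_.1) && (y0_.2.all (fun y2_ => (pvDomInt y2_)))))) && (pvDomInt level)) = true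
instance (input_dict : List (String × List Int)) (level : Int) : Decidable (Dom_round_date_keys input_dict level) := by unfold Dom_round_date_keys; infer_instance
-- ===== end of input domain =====

-- B replaces A's incremental dict mutation by one mapping pass (rounded key per entry)
-- followed by building each bucket per distinct rounded key; equal return values on Pre_.


-- rounded_key = '/'.join(date_key.split('/')[:level])  (split? is some: the separator "/" is nonempty)
def pvRoundKey (date_key : String) (level : Int) : String :=
  PySem.Str.join "/" (PySem.List.slice ((PySem.Str.split? date_key "/").getD []) none (some level))

-- ===== PORT A =====
def round_date_keys (input_dict : List (String × List Int)) (level : Int) : List (String × List Int) :=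
  let merged : PySem.Dict String (List Int) := input_dict.foldl
    (fun d p =>
      let rk := pvRoundKey p.1 level
      let d1 := if d.contains rk then d else d.insert rk ([] : List Int)
      d1.insert rk (d1.getD rk [] ++ p.2))
    PySem.Dict.empty
  merged.items

-- ===== PORT B =====
def round_date_keys_alt (input_dict : List (String × List Int)) (level : Int) : List (String × List Int) :=
  let pairs := input_dict.map (fun p => (pvRoundKey p.1 level, p.2))
  let order := PySem.List.dedup (pairs.map Prod.fst)
  order.map (fun rk => (rk, (pairs.filter (fun q => q.1 == rk)).flatMap Prod.snd))

-- ===== PRECONDITION & SPEC =====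
-- Pre_ excludes level < 0 (A raises ValueError there) and association lists with duplicate
-- keys (the argument is a Python dict, whose keys are necessarily distinct).
def Pre_round_date_keys (input_dict : List (String × List Int)) (level : Int) : Prop :=
  0 ≤ level ∧ (input_dict.map Prod.fst).Nodup
instance (input_dict : List (String × List Int)) (level : Int) : Decidable (Pre_round_date_keys input_dict level) := by unfold Pre_round_date_keys; infer_instance

def pvWitness_round_date_keys : (List (String × List Int)) × Int :=
  ([("2021/01/05", [1, 2]), ("2021/01/07", [3]), ("2021/02/01", [4])], 2)

def Spec_round_date_keys (input_dict : List (String × List Int)) (level : Int) (out : List (String × List Int)) : Prop := out = round_date_keys_alt input_dict level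
instance (input_dict : List (String × List Int)) (level : Int) (out : List (String × List Int)) : Decidable (Spec_round_date_keys input_dict level out) := by unfold Spec_round_date_keys; infer_instance

-- ===== CLAIM (what is proved, stated in full; the proofs are below) =====
def Claim_equal_round_date_keys : Prop := ∀ (input_dict : List (String × List Int)) (level : Int), Dom_round_date_keys input_dict level → Pre_round_date_keys input_dict level → Spec_round_date_keys input_dict level (round_date_keys input_dict level)

-- ===== LEMMAS AND PROOFS =====

-- A's loop body (setdefault-to-[] then overwrite with the extended list) is one 'modify'.
lemma pvStepA_eq_modify (d : PySem.Dict String (List Int)) (k : String) (v : List Int) :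
    (let d1 := if d.contains k then d else d.insert k ([] : List Int)
     d1.insert k (d1.getD k [] ++ v)) = d.modify k [] (· ++ v) := by
  by_cases h : d.contains k = true
  · simp [h, PySem.Dict.modify]
  · have h0 : d.getD k ([] : List Int) = [] :=
      PySem.Dict.getD_of_not_contains d _ (by simpa using h)
    simp [h, PySem.Dict.modify, h0, PySem.Dict.getD_insert_self,
      PySem.Dict.insert_insert_self]

-- lookup after the modify-fold: the concatenation of the data lists filed under k
lemma pvGetD_fold_modify (ps : List (String × List Int)) (d : PySem.Dict String (List Int))
    (k : String) :
    (ps.foldl (fun d p => d.modify p.1 [] (· ++ p.2)) d).getD k []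
      = d.getD k [] ++ (ps.filter (fun q => q.1 == k)).flatMap Prod.snd := by
  induction ps generalizing d with
  | nil => simp
  | cons p t ih =>
    simp only [List.foldl_cons, ih, List.filter_cons]
    by_cases h : p.1 = k
    · subst h; simp [PySem.Dict.getD_modify_self]
    · rw [PySem.Dict.getD_modify_of_ne d ([] : List Int) (· ++ p.2) (Ne.symm h)]
      simp [h]

-- ===== VERDICT =====
theorem round_date_keys_spec : Claim_equal_round_date_keys := by
  intro input_dict level _ _
  unfold Spec_round_date_keys round_date_keys round_date_keys_alt
  simp only
  have hstep : input_dict.foldl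
      (fun d p =>
        let rk := pvRoundKey p.1 level
        let d1 := if d.contains rk then d else d.insert rk ([] : List Int)
        d1.insert rk (d1.getD rk [] ++ p.2))
      PySem.Dict.empty
      = (input_dict.map (fun p => (pvRoundKey p.1 level, p.2))).foldl
          (fun d p => d.modify p.1 [] (· ++ p.2)) PySem.Dict.empty := by
    rw [List.foldl_map]
    exact PySem.List.foldl_congr_mem _ _ _ _
      (fun acc p _ => pvStepA_eq_modify acc (pvRoundKey p.1 level) p.2)
  rw [hstep]
  set ps := input_dict.map (fun p => (pvRoundKey p.1 level, p.2)) with hps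
  have hnd : (ps.foldl (fun d p => d.modify p.1 [] (· ++ p.2)) PySem.Dict.empty).keys.Nodup := by
    exact PySem.Dict.nodup_keys_foldl_modify_key ps Prod.fst [] (fun _ p v => v ++ p.2)
      PySem.Dict.empty (by simp)
  have hkeys : (ps.foldl (fun d p => d.modify p.1 [] (· ++ p.2)) PySem.Dict.empty).keys
      = PySem.List.dedup (ps.map Prod.fst) := by
    rw [PySem.Dict.keys_foldl_modify_key ps Prod.fst [] (fun _ p v => v ++ p.2)
      PySem.Dict.empty, PySem.List.dedup_eq_ofList]
    simp [PySem.Set.update, PySem.Set.ofList]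
  rw [PySem.Dict.items_eq_map_keys _ hnd ([] : List Int), hkeys]
  refine List.map_congr_left (fun k hk => ?_)
  rw [pvGetD_fold_modify]
  simp
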